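-- pv_equiv track=rewrite | github.com/aldoremiae-e/BOJ | 프로그래머스/unrated/181916. 주사위 게임 3/주사위 게임 3.py | solution
-- ===== SOURCE A (Python) =====
-- from collections import Counter
--
-- def solution(a, b, c, d):
--     answer = 1
--     lst = [a, b, c, d]
--     C = Counter(lst)
--     l = len(C)
--     if l == 1:
--         # 모두 같을 때
--         answer = a * 1111
--     elif l == 2:
--         # 3:1 / 2:2
--         a, b, flag_two = 0, 0, False
--         for key, val in C.items():
--             if val == 3:
--                 a = 10 * key
--             elif val == 1:
--                 b = key
--             else:
--                 flag_two = True
--                 if a == 0: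
--                     a = key
--                 else:
--                     b = key
--         if flag_two:
--             answer = (a + b) * abs(b - a)
--         else:
--             answer = (a + b) ** 2
--     elif l == 3:
--         # 2 1 1
--         for key, val in C.items():
--             if val == 1:
--                 answer *= key
--     else:
--         # 모두 다를 때
--         answer = min(a, b, c, d)
--     return answer
-- ===== SOURCE B (Python) =====
-- def solution(a, b, c, d):
--     w, x, y, z = sorted([a, b, c, d])
--     if w == z:
--         return w * 1111
--     if w == y:
--         return (10 * w + z) ** 2
--     if x == z:
--         return (10 * z + w) ** 2
--     if w == x and y == z:
--         return (w + y) * (z - x)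
--     if w == x:
--         return y * z
--     if x == y:
--         return w * z
--     if y == z:
--         return w * x
--     return w
-- ===== Notes on version B (the rewrite author's own statement) =====
-- stated objective: simpler
-- what changed: Replaces the Counter frequency map and its per-branch item loops with a sort of the four values followed by direct branching on positional equalities of the sorted quadruple.
import Mathlib
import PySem

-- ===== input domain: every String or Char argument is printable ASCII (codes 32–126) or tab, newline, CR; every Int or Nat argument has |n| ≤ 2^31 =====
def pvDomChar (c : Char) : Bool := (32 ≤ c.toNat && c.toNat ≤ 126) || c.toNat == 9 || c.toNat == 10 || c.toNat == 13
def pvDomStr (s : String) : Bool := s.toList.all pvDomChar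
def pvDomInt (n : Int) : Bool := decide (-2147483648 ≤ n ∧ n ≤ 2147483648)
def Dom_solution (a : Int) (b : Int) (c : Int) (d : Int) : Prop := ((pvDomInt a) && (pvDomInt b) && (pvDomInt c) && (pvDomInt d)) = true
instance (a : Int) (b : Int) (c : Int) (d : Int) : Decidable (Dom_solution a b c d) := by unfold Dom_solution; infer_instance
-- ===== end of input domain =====

-- B replaces A's Counter frequency analysis by sorting the four dice and branching on
-- positional equalities of the sorted quadruple (objective: simpler).

-- ===== PORT A =====
-- Literal port of A: Counter over [a,b,c,d]; branch on the number of distinct keys;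
-- the l==2 loop carries the (a, b, flag_two) state; the l==3 loop multiplies count-1 keys.
def solution (a : Int) (b : Int) (c : Int) (d : Int) : Int :=
  let answer : Int := 1
  let lst : List Int := [a, b, c, d]
  let C : PySem.Dict Int Int := PySem.Dict.counter lst
  let l : Nat := C.size
  if l = 1 then
    a * 1111
  else if l = 2 then
    let st := C.items.foldl
      (fun (st : Int × Int × Bool) kv =>
        if kv.2 = 3 then (10 * kv.1, st.2.1, st.2.2)
        else if kv.2 = 1 then (st.1, kv.1, st.2.2)
        else if st.1 = 0 then (kv.1, st.2.1, true)
        else (st.1, kv.1, true))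
      (0, 0, false)
    if st.2.2 then (st.1 + st.2.1) * |st.2.1 - st.1|
    else (st.1 + st.2.1) ^ 2
  else if l = 3 then
    C.items.foldl (fun ans kv => if kv.2 = 1 then ans * kv.1 else ans) answer
  else
    min (min (min a b) c) d

-- ===== PORT B =====
-- Literal port of B: sort the four values, branch on positional equalities.
def solution_alt (a : Int) (b : Int) (c : Int) (d : Int) : Int :=
  match PySem.List.sorted [a, b, c, d] (fun x => x) false with
  | [w, x, y, z] =>
    if w = z then w * 1111
    else if w = y then (10 * w + z) ^ 2
    else if x = z then (10 * z + w) ^ 2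
    else if w = x ∧ y = z then (w + y) * (z - x)
    else if w = x then y * z
    else if x = y then w * z
    else if y = z then w * x
    else w
  | _ => 0

-- ===== PRECONDITION & SPEC =====
def Spec_solution (a : Int) (b : Int) (c : Int) (d : Int) (out : Int) : Prop := out = solution_alt a b c d
instance (a : Int) (b : Int) (c : Int) (d : Int) (out : Int) : Decidable (Spec_solution a b c d out) := by unfold Spec_solution; infer_instance

-- ===== CLAIM (what is proved, stated in full; the proofs are below) =====
def Claim_equal_solution : Prop := ∀ (a : Int) (b : Int) (c : Int) (d : Int), Dom_solution a b c d → Spec_solution a b c d (solution a b c d)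

-- ===== LEMMAS AND PROOFS =====
-- Exhaustive case analysis over the order/equality pattern of (a, b, c, d):
-- trichotomy on each pair (inconsistent patterns pruned by omega), then both ports
-- evaluate by simp with the pattern facts, and the residual arithmetic closes by ring/omega.
set_option maxHeartbeats 4000000 in
theorem solution_eq_alt (a b c d : Int) : solution a b c d = solution_alt a b c d := by
  rcases lt_trichotomy a b with h1|h1|h1 <;>
  (first | omega | (
  rcases lt_trichotomy a c with h2|h2|h2 <;>
  (first | omega | (
  rcases lt_trichotomy b c with h4|h4|h4 <;>
  (first | omega | (
  rcases lt_trichotomy a d with h3|h3|h3 <;>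
  (first | omega | (
  rcases lt_trichotomy b d with h5|h5|h5 <;>
  (first | omega | (
  rcases lt_trichotomy c d with h6|h6|h6 <;>
  (first | omega | (
  first
    | omega
    | (try have n1 : a ≠ b := by omega
       try have n1' : b ≠ a := by omega
       try have m1 : ¬ (b < a) := by omega
       try have m1' : ¬ (a < b) := by omega
       try have o1 : a ≤ b := by omega
       try have o1' : b ≤ a := by omega
       try have n2 : a ≠ c := by omega
       try have n2' : c ≠ a := by omega
       try have m2 : ¬ (c < a) := by omega
       try have m2' : ¬ (a < c) := by omega
       try have o2 : a ≤ c := by omega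
       try have o2' : c ≤ a := by omega
       try have n3 : a ≠ d := by omega
       try have n3' : d ≠ a := by omega
       try have m3 : ¬ (d < a) := by omega
       try have m3' : ¬ (a < d) := by omega
       try have o3 : a ≤ d := by omega
       try have o3' : d ≤ a := by omega
       try have n4 : b ≠ c := by omega
       try have n4' : c ≠ b := by omega
       try have m4 : ¬ (c < b) := by omega
       try have m4' : ¬ (b < c) := by omega
       try have o4 : b ≤ c := by omega
       try have o4' : c ≤ b := by omega
       try have n5 : b ≠ d := by omega
       try have n5' : d ≠ b := by omega
       try have m5 : ¬ (d < b) := by omega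
       try have m5' : ¬ (b < d) := by omega
       try have o5 : b ≤ d := by omega
       try have o5' : d ≤ b := by omega
       try have n6 : c ≠ d := by omega
       try have n6' : d ≠ c := by omega
       try have m6 : ¬ (d < c) := by omega
       try have m6' : ¬ (c < d) := by omega
       try have o6 : c ≤ d := by omega
       try have o6' : d ≤ c := by omega
       simp [*, solution, solution_alt, PySem.Dict.size, PySem.Dict.items_counter,
         PySem.Set.ofList, PySem.Set.add, PySem.Set.contains,
         PySem.List.sorted_eq_foldl_insertBy, PySem.List.insertBy,
         abs_eq_max_neg, max_def, min_def]
       try ring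
       try omega
       try (split_ifs <;> (try subst_vars) <;> (try simp_all [abs_eq_max_neg, max_def]) <;>
             (try ring) <;> (try omega) <;>
             (try (split_ifs <;> (try subst_vars) <;> (try simp_all) <;> (try ring) <;> (try omega)))))))))))))))))

-- ===== VERDICT (by name: the statement is the Claim_ definition above) =====
theorem solution_spec : Claim_equal_solution := by
  intro a b c d _
  unfold Spec_solution
  exact solution_eq_alt a b c d
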